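-- pv_equiv track=rewrite | github.com/midrovo/odoo_custom_addons | custom_deposit/models/deposit.py | verificar_fechas_correctas
-- ===== SOURCE A (Python) =====
-- def verificar_fechas_correctas(records):
--     if records:
--         longitud = len(records)
--         contador_slash = 0
--         contador_guion = 0
--         for record in records:
--             fecha_record = record['fecha_char']
--             if '/' in fecha_record:
--                 contador_slash = contador_slash + 1
--
--             elif '-' in fecha_record:
--                 contador_guion = contador_guion + 1
--
--         if contador_slash == longitud or contador_guion == longitud:
--             return True
--
--         return False
-- ===== SOURCE B (Python) =====
-- def verificar_fechas_correctas(records):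
--     if not records:
--         return None
--     seps = {('/' if '/' in r['fecha_char'] else '-' if '-' in r['fecha_char'] else None)
--             for r in records}
--     return seps == {'/'} or seps == {'-'}
-- ===== Notes on version B (the rewrite author's own statement) =====
-- stated objective: simpler
-- what changed: Replaces the two running counters compared against len(records) by a one-pass set comprehension of each record's separator category ('/' wins over '-'), returning whether that set is exactly {'/'} or exactly {'-'}.
-- outside the precondition, e.g. on verificar_fechas_correctas([]): A returns None, B returns None
import Mathlib
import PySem

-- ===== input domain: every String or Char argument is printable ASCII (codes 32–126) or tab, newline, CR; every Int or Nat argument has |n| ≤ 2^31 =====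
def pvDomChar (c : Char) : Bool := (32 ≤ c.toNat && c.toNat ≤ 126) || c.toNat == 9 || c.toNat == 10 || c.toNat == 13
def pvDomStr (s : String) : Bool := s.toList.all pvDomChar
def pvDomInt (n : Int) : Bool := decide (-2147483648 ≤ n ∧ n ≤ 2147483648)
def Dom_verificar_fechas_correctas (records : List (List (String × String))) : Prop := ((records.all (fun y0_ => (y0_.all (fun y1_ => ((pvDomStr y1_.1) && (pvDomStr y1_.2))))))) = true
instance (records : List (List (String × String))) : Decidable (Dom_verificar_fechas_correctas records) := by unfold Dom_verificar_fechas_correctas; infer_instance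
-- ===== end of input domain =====

-- B replaces A's two counters-vs-length test by a set of per-record separator categories; same cost, simpler.
-- ===== PORT A =====
-- one loop step of A: slash wins, elif counts the dash
def pvStepA (p : Nat × Nat) (record : List (String × String)) : Nat × Nat :=
  let fecha_record := PySem.Dict.getD (PySem.Dict.mk record) "fecha_char" ""   -- key present on Pre_; raises outside Pre_
  if PySem.Str.isIn "/" fecha_record then (p.1 + 1, p.2)
  else if PySem.Str.isIn "-" fecha_record then (p.1, p.2 + 1)
  else p

def verificar_fechas_correctas (records : List (List (String × String))) : Bool :=
  if records ≠ [] then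
    let longitud := records.length
    let p := records.foldl pvStepA (0, 0)
    if p.1 = longitud ∨ p.2 = longitud then true else false
  else false   -- Python returns None here (no bool); excluded by Pre_

-- ===== PORT B =====
def pvCategory (r : List (String × String)) : Option Char :=
  let f := PySem.Dict.getD (PySem.Dict.mk r) "fecha_char" ""   -- key present on Pre_; raises outside Pre_
  if PySem.Str.isIn "/" f then some '/' else if PySem.Str.isIn "-" f then some '-' else none

def verificar_fechas_correctas_alt (records : List (List (String × String))) : Bool :=
  if records = [] then false   -- Python returns None here (no bool); excluded by Pre_
  else
    let seps : PySem.Set (Option Char) := PySem.Set.ofList (records.map pvCategory)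
    PySem.Set.equal seps (PySem.Set.ofList [some '/']) ||
      PySem.Set.equal seps (PySem.Set.ofList [some '-'])

-- ===== PRECONDITION & SPEC =====
-- Pre_ excludes the empty list, where A returns None (not a bool), and records lacking the
-- 'fecha_char' key, where A raises KeyError.
def Pre_verificar_fechas_correctas (records : List (List (String × String))) : Prop :=
  records ≠ [] ∧ ∀ r ∈ records, PySem.Dict.contains (PySem.Dict.mk r) "fecha_char" = true
instance (records : List (List (String × String))) : Decidable (Pre_verificar_fechas_correctas records) := by
  unfold Pre_verificar_fechas_correctas; infer_instance
def pvWitness_verificar_fechas_correctas : (List (List (String × String))) :=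
  [[("fecha_char", "01/02/2020")], [("fecha_char", "03/04/2021")]]

def Spec_verificar_fechas_correctas (records : List (List (String × String))) (out : Bool) : Prop := out = verificar_fechas_correctas_alt records
instance (records : List (List (String × String))) (out : Bool) : Decidable (Spec_verificar_fechas_correctas records out) := by unfold Spec_verificar_fechas_correctas; infer_instance

-- ===== CLAIM (what is proved, stated in full; the proofs are below) =====
def Claim_equal_verificar_fechas_correctas : Prop := ∀ (records : List (List (String × String))), Dom_verificar_fechas_correctas records → Pre_verificar_fechas_correctas records → Spec_verificar_fechas_correctas records (verificar_fechas_correctas records)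

-- ===== LEMMAS AND PROOFS =====

lemma pvStepA_eq_cat (p : Nat × Nat) (r : List (String × String)) :
    pvStepA p r = if pvCategory r = some '/' then (p.1 + 1, p.2)
      else if pvCategory r = some '-' then (p.1, p.2 + 1) else p := by
  simp only [pvStepA, pvCategory]
  split_ifs <;> simp_all

lemma foldA_counts (l : List (List (String × String))) (a b : Nat) :
    l.foldl pvStepA (a, b) =
      (a + l.countP (fun r => pvCategory r = some '/'),
       b + l.countP (fun r => pvCategory r = some '-')) := by
  induction l generalizing a b with
  | nil => simp
  | cons r t ih =>
      simp only [List.foldl_cons, List.countP_cons, pvStepA_eq_cat, decide_eq_true_eq]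
      split_ifs <;> simp_all <;> omega

lemma countP_cat_eq_length_iff (l : List (List (String × String))) (c : Char) :
    l.countP (fun r => pvCategory r = some c) = l.length ↔ ∀ r ∈ l, pvCategory r = some c := by
  rw [List.countP_eq_length]
  simp

lemma set_equal_singleton_iff (l : List (List (String × String))) (c : Char) (hne : l ≠ []) :
    PySem.Set.equal (PySem.Set.ofList (l.map pvCategory)) (PySem.Set.ofList [some c]) = true ↔
      ∀ r ∈ l, pvCategory r = some c := by
  rw [PySem.Set.equal_iff]
  constructor
  · intro h r hr
    have hm := (h (pvCategory r)).1
    simp only [PySem.Set.mem_ofList, List.mem_map] at hm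
    have := hm ⟨r, hr, rfl⟩
    simpa using this
  · intro h x
    obtain ⟨r0, hr0⟩ := List.exists_mem_of_ne_nil l hne
    simp only [PySem.Set.mem_ofList, List.mem_map, List.mem_singleton]
    constructor
    · rintro ⟨r, hr, rfl⟩; exact h r hr
    · rintro rfl; exact ⟨r0, hr0, h r0 hr0⟩

-- ===== VERDICT (by name: the statement is the Claim_ definition above) =====
theorem verificar_fechas_correctas_spec : Claim_equal_verificar_fechas_correctas := by
  intro records _ hpre
  obtain ⟨hne, -⟩ := hpre
  unfold Spec_verificar_fechas_correctas verificar_fechas_correctas verificar_fechas_correctas_alt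
  rw [if_pos hne, if_neg hne, foldA_counts]
  simp only [Nat.zero_add]
  split_ifs with hor
  · symm
    rw [Bool.or_eq_true]
    rcases hor with h | h
    · exact Or.inl ((set_equal_singleton_iff _ _ hne).2 ((countP_cat_eq_length_iff _ _).1 h))
    · exact Or.inr ((set_equal_singleton_iff _ _ hne).2 ((countP_cat_eq_length_iff _ _).1 h))
  · symm
    rw [Bool.or_eq_false_iff]
    constructor <;> rw [← Bool.not_eq_true, set_equal_singleton_iff _ _ hne] <;> intro hall <;>
      exact hor (by first
        | exact Or.inl ((countP_cat_eq_length_iff _ _).2 hall)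
        | exact Or.inr ((countP_cat_eq_length_iff _ _).2 hall))
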